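-- pv_equiv track=rewrite | github.com/MajidAkh/datascientist_train_demand | pipeline/d_model_validation.py | compare_Y
-- ===== SOURCE A (Python) =====
-- DAYS_VAL = (-90, -60, -30, -20, -15, -10, -7, -6, -5, -3, -2, -1)
--
-- def compare_Y(remaining_demand_sale_x):
--     y_test = []
--     for i in DAYS_VAL:
--         if i in remaining_demand_sale_x:
--             y_test.append(remaining_demand_sale_x[i])
--         else:
--             b = True
--             while b:
--                 i += 1
--                 if i in remaining_demand_sale_x:
--                     y_test.append(remaining_demand_sale_x[i])
--                     b = False
--                 elif i == 0:
--                     y_test.append(0)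
--                     b = False
--     return y_test
-- ===== SOURCE B (Python) =====
-- DAYS_VAL = (-90, -60, -30, -20, -15, -10, -7, -6, -5, -3, -2, -1)
--
-- def compare_Y(remaining_demand_sale_x):
--     y_test = []
--     for i in DAYS_VAL:
--         window = [k for k in remaining_demand_sale_x if i <= k <= 0]
--         y_test.append(remaining_demand_sale_x[min(window)] if window else 0)
--     return y_test
-- ===== Notes on version B (the rewrite author's own statement) =====
-- stated objective: simpler
-- what changed: Replaces A's per-offset mutable forward-scan while-loop (step i upward until a key is hit or 0 is reached) with a declarative per-offset step: filter the dict's keys to the window [i, 0] and look up the minimum key, 0 if the window is empty.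
import Mathlib
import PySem

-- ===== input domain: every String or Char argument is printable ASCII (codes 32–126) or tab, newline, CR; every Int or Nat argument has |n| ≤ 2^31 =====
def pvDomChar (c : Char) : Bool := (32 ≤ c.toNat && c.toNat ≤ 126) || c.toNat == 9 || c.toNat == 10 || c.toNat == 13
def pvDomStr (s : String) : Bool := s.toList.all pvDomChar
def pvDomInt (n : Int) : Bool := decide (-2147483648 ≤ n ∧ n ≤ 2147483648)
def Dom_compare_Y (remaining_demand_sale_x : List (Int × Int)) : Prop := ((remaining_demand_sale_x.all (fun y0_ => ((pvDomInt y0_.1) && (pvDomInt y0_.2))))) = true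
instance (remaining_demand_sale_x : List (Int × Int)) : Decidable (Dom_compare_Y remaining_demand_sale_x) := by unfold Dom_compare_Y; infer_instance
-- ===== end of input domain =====

-- B replaces A's per-offset mutable forward-scan while-loop by a declarative
-- window-filter + min over the dict's keys (objective: simpler).

-- ===== PORT A =====
def pvDaysVal : List Int := [-90, -60, -30, -20, -15, -10, -7, -6, -5, -3, -2, -1]

-- the 'while b:' loop of A; fuel = number of increments until i reaches 0 (the loop
-- always stops by then for the negative offsets of DAYS_VAL, so fuel 0 is unreachable)
def pvScanA (d : PySem.Dict Int Int) : Int → Nat → Int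
  | i, fuel+1 =>
    let i' := i + 1
    if d.contains i' then d.getD i' 0
    else if i' = 0 then 0
    else pvScanA d i' fuel
  | _, 0 => 0

def compare_Y (remaining_demand_sale_x : List (Int × Int)) : List Int :=
  pvDaysVal.foldl (fun y_test i =>
    if (PySem.Dict.mk remaining_demand_sale_x).contains i then
      y_test ++ [(PySem.Dict.mk remaining_demand_sale_x).getD i 0]
    else
      y_test ++ [pvScanA (PySem.Dict.mk remaining_demand_sale_x) i (0 - i).toNat]) []

-- ===== PORT B =====
def compare_Y_alt (remaining_demand_sale_x : List (Int × Int)) : List Int :=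
  pvDaysVal.map (fun i =>
    let window := (PySem.Dict.keys (PySem.Dict.mk remaining_demand_sale_x)).filter
      (fun k => decide (i ≤ k) && decide (k ≤ 0))
    match PySem.List.min? window (fun k => k) with
    | some m => (PySem.Dict.mk remaining_demand_sale_x).getD m 0
    | none => 0)

-- ===== PRECONDITION & SPEC =====
def Spec_compare_Y (remaining_demand_sale_x : List (Int × Int)) (out : List Int) : Prop := out = compare_Y_alt remaining_demand_sale_x
instance (remaining_demand_sale_x : List (Int × Int)) (out : List Int) : Decidable (Spec_compare_Y remaining_demand_sale_x out) := by unfold Spec_compare_Y; infer_instance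

-- ===== CLAIM (what is proved, stated in full; the proofs are below) =====
def Claim_equal_compare_Y : Prop := ∀ (remaining_demand_sale_x : List (Int × Int)), Dom_compare_Y remaining_demand_sale_x → Spec_compare_Y remaining_demand_sale_x (compare_Y remaining_demand_sale_x)

-- ===== LEMMAS AND PROOFS =====

-- per-offset value of A (the body of A's loop, as a pure function of the offset)
def pvAVal (d : PySem.Dict Int Int) (i : Int) : Int :=
  if d.contains i then d.getD i 0 else pvScanA d i (0 - i).toNat

-- per-offset value of B
def pvBVal (d : PySem.Dict Int Int) (i : Int) : Int :=
  match PySem.List.min? ((PySem.Dict.keys d).filter (fun k => decide (i ≤ k) && decide (k ≤ 0))) (fun k => k) with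
  | some m => d.getD m 0
  | none => 0

-- if i itself is a key, B's window-min is i
lemma pvBVal_of_contains (d : PySem.Dict Int Int) (i : Int) (hi : i ≤ 0)
    (h : d.contains i = true) : pvBVal d i = d.getD i 0 := by
  unfold pvBVal
  have hmem : i ∈ (PySem.Dict.keys d).filter (fun k => decide (i ≤ k) && decide (k ≤ 0)) := by
    simp [List.mem_filter, hi]
    exact (PySem.Dict.contains_iff_mem_keys d i).mp h
  cases hmin : PySem.List.min? ((PySem.Dict.keys d).filter (fun k => decide (i ≤ k) && decide (k ≤ 0))) (fun k => k) with
  | none =>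
      rw [PySem.List.min?_eq_none_iff] at hmin
      simp [hmin] at hmem
  | some m =>
      have h1 := PySem.List.min?_isMin hmin i hmem
      have h2 := PySem.List.min?_mem hmin
      simp only [List.mem_filter, decide_eq_true_eq, Bool.and_eq_true] at h2
      have : m = i := le_antisymm (by simpa using h1) h2.2.1
      simp [this]

-- if i is not a key, B's window for i equals B's window for i+1
lemma pvBVal_step (d : PySem.Dict Int Int) (i : Int)
    (h : d.contains i = false) : pvBVal d i = pvBVal d (i + 1) := by
  unfold pvBVal
  have hne : i ∉ PySem.Dict.keys d := fun hm =>
    by simp [(PySem.Dict.contains_iff_mem_keys d i).mpr hm] at h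
  have : (PySem.Dict.keys d).filter (fun k => decide (i ≤ k) && decide (k ≤ 0))
       = (PySem.Dict.keys d).filter (fun k => decide (i + 1 ≤ k) && decide (k ≤ 0)) := by
    apply List.filter_congr
    intro k hk
    have hki : k ≠ i := fun he => hne (he ▸ hk)
    have hiff : i ≤ k ↔ i + 1 ≤ k := by omega
    simp [hiff]
  rw [this]

-- the key equivalence: A's forward scan equals B's window minimum
lemma scan_eq (n : Nat) : ∀ (d : PySem.Dict Int Int) (i : Int), i = -(n : Int) →
    (if d.contains i then d.getD i 0 else pvScanA d i n) = pvBVal d i := by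
  induction n with
  | zero =>
      intro d i hi
      have hi0 : i = 0 := by omega
      subst hi0
      by_cases h : d.contains 0 = true
      · simp only [h, if_true]
        exact (pvBVal_of_contains d _ (by norm_num) h).symm
      · simp only [Bool.not_eq_true] at h
        simp only [h, pvScanA]
        unfold pvBVal
        have hflt : ((PySem.Dict.keys d).filter (fun k => decide ((0:Int) ≤ k) && decide (k ≤ 0))) = [] := by
          rw [List.filter_eq_nil_iff]
          intro k hk
          have hne : (0:Int) ∉ PySem.Dict.keys d := fun hm =>
            by simp [(PySem.Dict.contains_iff_mem_keys d _).mpr hm] at h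
          have hk0 : k ≠ 0 := fun he => hne (he ▸ hk)
          simp; omega
        rw [hflt]
        rfl
  | succ n ih =>
      intro d i hi
      by_cases h : d.contains i = true
      · simp only [h, if_true]
        exact (pvBVal_of_contains d i (by omega) h).symm
      · simp only [Bool.not_eq_true] at h
        simp only [h, pvScanA]
        rw [pvBVal_step d i h]
        have hi' : i + 1 = -(n : Int) := by omega
        have := ih d (i + 1) hi'
        by_cases hc : d.contains (i + 1) = true
        · simpa [hc] using this
        · simp only [Bool.not_eq_true] at hc
          by_cases h0 : i + 1 = 0
          · have hn0 : n = 0 := by omega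
            subst hn0
            simpa [hc, h0, pvScanA] using this
          · simpa [hc, h0] using this

-- A's per-offset value equals B's, for every nonpositive offset
lemma aval_eq_bval (d : PySem.Dict Int Int) (i : Int) (hi : i ≤ 0) :
    pvAVal d i = pvBVal d i := by
  have hn : i = -(((0 - i).toNat : Nat) : Int) := by omega
  unfold pvAVal
  exact scan_eq (0 - i).toNat d i hn

-- A's accumulator loop is a map of the per-offset value
lemma compare_Y_eq_map (xs : List (Int × Int)) :
    compare_Y xs = pvDaysVal.map (pvAVal (PySem.Dict.mk xs)) := by
  unfold compare_Y
  have hbody : (fun (y_test : List Int) (i : Int) =>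
      if (PySem.Dict.mk xs).contains i then y_test ++ [(PySem.Dict.mk xs).getD i 0]
      else y_test ++ [pvScanA (PySem.Dict.mk xs) i (0 - i).toNat])
      = (fun y_test i => y_test ++ [pvAVal (PySem.Dict.mk xs) i]) := by
    funext y_test i
    unfold pvAVal
    split_ifs <;> rfl
  rw [hbody, PySem.List.foldl_append_singleton_eq_map, List.nil_append]

-- ===== VERDICT (by name: the statement is the Claim_ definition above) =====
theorem compare_Y_spec : Claim_equal_compare_Y := by
  intro xs _
  unfold Spec_compare_Y
  rw [compare_Y_eq_map]
  unfold compare_Y_alt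
  simp only []
  apply List.map_congr_left
  intro i hi
  have hle : i ≤ 0 := by
    simp only [pvDaysVal, List.mem_cons, List.not_mem_nil, or_false] at hi
    rcases hi with h|h|h|h|h|h|h|h|h|h|h|h <;> omega
  rw [aval_eq_bval _ i hle]
  unfold pvBVal
  rfl
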